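-- pv_equiv track=rewrite | github.com/Matin0SH/AIOps | version02/tools/executor.py | _verify_execution
-- ===== SOURCE A (Python) =====
-- from typing import Dict, List, Any, Optional
--
-- def _verify_execution(
--
--     notebook: Dict,
--     commands: List[str],
--     device_output: str,
--     params: Dict
-- ) -> bool:
--     """
--     Verify that configuration was actually applied to device.
--
--     Uses regex parsing like collector.py does for output parsing.
--     Post-execution validation - ensure change took effect.
--
--     Args:
--         notebook: Notebook definition
--         commands: Commands that were sent
--         device_output: Raw device output from command execution
--         params: Parameters used (for rendering verification commands)
--
--     Returns:
--         bool: True if verification passed, False otherwise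
--     """
--     # For now, simple heuristic: if no error in output, assume success
--     # TODO: Add post_execution_validation commands from notebook
--     # if notebook has "post_execution_validation" field with verification commands
--
--     # Check for common error indicators
--     error_indicators = [
--         "% Invalid command",
--         "% Incomplete command",
--         "% Ambiguous command",
--         "error",
--         "ERROR"
--     ]
--
--     for indicator in error_indicators:
--         if indicator in device_output:
--             return False
--
--     return True
-- ===== SOURCE B (Python) =====
-- _ERROR_INDICATORS = (
--     "% Invalid command",
--     "% Incomplete command",
--     "% Ambiguous command",
--     "error",
--     "ERROR",
-- )
--
-- # Index the indicators once by their first character, so the scan tries a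
-- # candidate only at positions where its first character actually occurs.
-- _BY_FIRST = {}
-- for _p in _ERROR_INDICATORS:
--     _BY_FIRST.setdefault(_p[0], []).append(_p)
--
--
-- def _verify_execution(notebook, commands, device_output, params):
--     """Single left-to-right pass with a first-character dispatch table."""
--     for i, ch in enumerate(device_output):
--         for p in _BY_FIRST.get(ch, ()):
--             if device_output.startswith(p, i):
--                 return False
--     return True
-- ===== Notes on version B (the rewrite author's own statement) =====
-- stated objective: alternative
-- what changed: B replaces A's five independent full substring scans by one hand-written left-to-right pass over the output that, at each position, consults a dict built once from the indicators' first characters and prefix-checks only the candidates bucketed under the current character.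
import Mathlib
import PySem

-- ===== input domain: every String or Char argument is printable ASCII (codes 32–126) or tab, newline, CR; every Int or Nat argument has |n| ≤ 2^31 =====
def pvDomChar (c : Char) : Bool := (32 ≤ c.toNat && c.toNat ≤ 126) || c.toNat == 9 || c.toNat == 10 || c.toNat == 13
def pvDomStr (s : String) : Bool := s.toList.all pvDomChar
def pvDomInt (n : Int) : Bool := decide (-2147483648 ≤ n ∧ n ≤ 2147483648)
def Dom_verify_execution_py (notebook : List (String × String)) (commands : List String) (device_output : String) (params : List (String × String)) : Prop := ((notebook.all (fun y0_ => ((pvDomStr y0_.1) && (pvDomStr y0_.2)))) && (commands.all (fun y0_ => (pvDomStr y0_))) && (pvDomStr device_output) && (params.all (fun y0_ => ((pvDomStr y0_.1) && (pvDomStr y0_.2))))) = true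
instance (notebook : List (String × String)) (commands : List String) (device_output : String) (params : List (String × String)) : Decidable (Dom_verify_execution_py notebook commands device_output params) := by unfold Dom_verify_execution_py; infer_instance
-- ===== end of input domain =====

-- B replaces A's five independent substring scans by one pass with a first-character dispatch dict (return value only).
-- ===== PORT A =====
-- the error_indicators list literal from A
def pvIndicators : List String :=
  ["% Invalid command", "% Incomplete command", "% Ambiguous command", "error", "ERROR"]

-- 'for indicator in error_indicators: if indicator in device_output: return False' / 'return True'
def pvLoopA (device_output : String) : List String → Bool
  | [] => true
  | indicator :: rest =>
      if PySem.Str.isIn indicator device_output then false else pvLoopA device_output rest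

def verify_execution_py (notebook : List (String × String)) (commands : List String) (device_output : String) (params : List (String × String)) : Bool :=
  pvLoopA device_output pvIndicators

-- ===== PORT B =====
-- the _ERROR_INDICATORS tuple, as char lists
def pvPatsB : List (List Char) :=
  ["% Invalid command".toList, "% Incomplete command".toList, "% Ambiguous command".toList,
   "error".toList, "ERROR".toList]

-- '_BY_FIRST = {}; for _p in _ERROR_INDICATORS: _BY_FIRST.setdefault(_p[0], []).append(_p)'
def pvByFirst : PySem.Dict Char (List (List Char)) :=
  pvPatsB.foldl (fun d p => d.insert (p.headD ' ') (d.getD (p.headD ' ') [] ++ [p])) PySem.Dict.empty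

-- 'for i, ch in enumerate(device_output): for p in _BY_FIRST.get(ch, ()): if device_output.startswith(p, i): return False' / 'return True'
-- (startswith(p, i) on the suffix beginning at i = isPrefixOf on that suffix)
def pvScanB : List Char → Bool
  | [] => true
  | c :: t =>
      if (pvByFirst.getD c []).any (fun p => p.isPrefixOf (c :: t)) then false
      else pvScanB t

def verify_execution_py_alt (notebook : List (String × String)) (commands : List String) (device_output : String) (params : List (String × String)) : Bool :=
  pvScanB device_output.toList

-- ===== PRECONDITION & SPEC =====
def Spec_verify_execution_py (notebook : List (String × String)) (commands : List String) (device_output : String) (params : List (String × String)) (out : Bool) : Prop := out = verify_execution_py_alt notebook commands device_output params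
instance (notebook : List (String × String)) (commands : List String) (device_output : String) (params : List (String × String)) (out : Bool) : Decidable (Spec_verify_execution_py notebook commands device_output params out) := by unfold Spec_verify_execution_py; infer_instance

-- ===== CLAIM (what is proved, stated in full; the proofs are below) =====
def Claim_equal_verify_execution_py : Prop := ∀ (notebook : List (String × String)) (commands : List String) (device_output : String) (params : List (String × String)), Dom_verify_execution_py notebook commands device_output params → Spec_verify_execution_py notebook commands device_output params (verify_execution_py notebook commands device_output params)

-- ===== LEMMAS AND PROOFS =====

-- A's loop returns true iff no indicator occurs in the output
theorem pvLoopA_eq (s : String) (inds : List String) :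
    pvLoopA s inds = !(inds.any (fun i => PySem.Str.isIn i s)) := by
  induction inds with
  | nil => rfl
  | cons i rest ih =>
      cases h : PySem.Str.isIn i s with
      | false => simp only [pvLoopA, h, if_neg Bool.false_ne_true, List.any_cons, ih, Bool.false_or]
      | true => simp only [pvLoopA, h, if_true, List.any_cons, Bool.true_or, Bool.not_true]

-- substring of c :: t = prefix of c :: t, or substring of t
theorem pv_isIn_cons (p : List Char) (c : Char) (t : List Char) :
    PySem.Chars.isIn p (c :: t) = (p.isPrefixOf (c :: t) || PySem.Chars.isIn p t) := by
  rw [Bool.eq_iff_iff]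
  simp only [Bool.or_eq_true, PySem.Chars.isIn_iff_infix, List.isPrefixOf_iff_prefix]
  exact List.infix_cons_iff

-- the dispatch dict, evaluated
theorem pvByFirst_eval :
    pvByFirst = PySem.Dict.mk
      [('%', ["% Invalid command".toList, "% Incomplete command".toList, "% Ambiguous command".toList]),
       ('e', ["error".toList]), ('E', ["ERROR".toList])] := by
  decide

-- a prefix check against a head-mismatching suffix fails
theorem pv_prefix_mismatch (a b : Char) (as bs : List Char) (h : (a == b) = false) :
    List.isPrefixOf (a :: as) (b :: bs) = false := by
  simp [List.isPrefixOf, h]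

-- 'any' over a disjunction splits
theorem pv_any_or {α : Type} (l : List α) (f g : α → Bool) :
    (l.any fun x => f x || g x) = (l.any f || l.any g) := by
  induction l with
  | nil => rfl
  | cons a t ih =>
      simp only [List.any_cons, ih]
      cases f a <;> cases g a <;> simp

-- checking only the bucket of the current character equals checking all five patterns
theorem pv_dispatch_eq (c : Char) (t : List Char) :
    ((pvByFirst.getD c []).any (fun p => p.isPrefixOf (c :: t)))
      = pvPatsB.any (fun p => p.isPrefixOf (c :: t)) := by
  rw [pvByFirst_eval]
  by_cases h1 : c = '%'
  · subst h1
    simp [PySem.Dict.getD, PySem.Dict.get?_mk_cons, pvPatsB, pv_prefix_mismatch]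
  · by_cases h2 : c = 'e'
    · subst h2
      simp [PySem.Dict.getD, PySem.Dict.get?_mk_cons, pvPatsB, pv_prefix_mismatch]
    · by_cases h3 : c = 'E'
      · subst h3
        simp [PySem.Dict.getD, PySem.Dict.get?_mk_cons, pvPatsB, pv_prefix_mismatch]
      · have b1 : ('%' == c) = false := by simp [Ne.symm h1]
        have b2 : ('e' == c) = false := by simp [Ne.symm h2]
        have b3 : ('E' == c) = false := by simp [Ne.symm h3]
        simp [PySem.Dict.getD, PySem.Dict.get?, pvPatsB, b1, b2, b3,
              pv_prefix_mismatch]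

-- B's scan returns true iff no pattern occurs as a substring
theorem pvScanB_eq (s : List Char) :
    pvScanB s = !(pvPatsB.any (fun p => PySem.Chars.isIn p s)) := by
  induction s with
  | nil => decide
  | cons c t ih =>
      rw [pvScanB, pv_dispatch_eq]
      have : pvPatsB.any (fun p => PySem.Chars.isIn p (c :: t))
          = (pvPatsB.any (fun p => p.isPrefixOf (c :: t))
             || pvPatsB.any (fun p => PySem.Chars.isIn p t)) := by
        rw [← pv_any_or]
        congr 1; funext p; exact pv_isIn_cons p c t
      rw [this]
      cases h : pvPatsB.any (fun p => p.isPrefixOf (c :: t)) with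
      | true => simp
      | false => simpa using ih

-- ===== VERDICT (by name: the statement is the Claim_ definition above) =====
theorem verify_execution_py_spec : Claim_equal_verify_execution_py := by
  intro notebook commands device_output params _
  unfold Spec_verify_execution_py verify_execution_py verify_execution_py_alt
  rw [pvLoopA_eq, pvScanB_eq]
  have h : pvPatsB = pvIndicators.map String.toList := rfl
  rw [h, List.any_map]
  simp only [Function.comp_def, PySem.Str.isIn_eq]
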